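-- pv_equiv track=rewrite | github.com/jeonyujin4209/crypto_ctf | cryptohack/Prime and Prejudice/solve.py | compute_S_a_prime
-- ===== SOURCE A (Python) =====
-- def compute_S_a_prime(S_a, a, ks):
--     """
--     Compute S_a' = intersection over all k_i of { k_i^{-1} * (S_a + k_i - 1) mod 4a }
--     filtered by the constraint that the result ≡ 3 mod 4.
--     """
--     m = 4 * a
--     result = None
--     for k in ks:
--         k_inv = pow(k, -1, m)
--         transformed = set()
--         for s in S_a:
--             val = ((s + k - 1) * k_inv) % m
--             if val % 4 == 3:  # p1 ≡ 3 mod 4 ensures v2(p1-1) = 1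
--                 transformed.add(val)
--         if result is None:
--             result = transformed
--         else:
--             result = result.intersection(transformed)
--     return result
-- ===== SOURCE B (Python) =====
-- def _gcd(x, y):
--     while y:
--         x, y = y, x % y
--     return abs(x)
--
-- def compute_S_a_prime(S_a, a, ks):
--     """Same result as A: process only the first k with the full transform+filter;
--     every later k only prunes the surviving set via preimage membership in S_a mod m,
--     instead of rebuilding and intersecting a whole transformed set per k."""
--     if not ks:
--         return None
--     m = 4 * a
--     S_mod = {s % m for s in S_a}
--     k0 = ks[0]
--     k0_inv = pow(k0, -1, m)
--     result = set()
--     for s in S_a: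
--         val = ((s + k0 - 1) * k0_inv) % m
--         if val % 4 == 3:
--             result.add(val)
--     for k in ks[1:]:
--         if _gcd(k, m) != 1:
--             # preimage pruning is only valid for invertible k (A's pow raises here too)
--             raise ValueError('base is not invertible for the given modulus')
--         result = {val for val in result if (val * k - k + 1) % m in S_mod}
--     return result
-- ===== Notes on version B (the rewrite author's own statement) =====
-- stated objective: alternative
-- what changed: B builds the transformed filtered set only for the first k and then, for each later k, prunes the surviving set in place by testing whether each survivor's preimage (val*k-k+1) % m lies in S_a reduced mod m, instead of rebuilding a whole transformed set per k and intersecting; Pre_ excludes ks=[] (A returns None, not a list) and inputs where pow(k,-1,4*a) raises ValueError (4*a=0 or gcd(k,4*a)!=1).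
-- outside the precondition, e.g. on compute_S_a_prime({3}, 1, []): A returns None, B returns None
import Mathlib
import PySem

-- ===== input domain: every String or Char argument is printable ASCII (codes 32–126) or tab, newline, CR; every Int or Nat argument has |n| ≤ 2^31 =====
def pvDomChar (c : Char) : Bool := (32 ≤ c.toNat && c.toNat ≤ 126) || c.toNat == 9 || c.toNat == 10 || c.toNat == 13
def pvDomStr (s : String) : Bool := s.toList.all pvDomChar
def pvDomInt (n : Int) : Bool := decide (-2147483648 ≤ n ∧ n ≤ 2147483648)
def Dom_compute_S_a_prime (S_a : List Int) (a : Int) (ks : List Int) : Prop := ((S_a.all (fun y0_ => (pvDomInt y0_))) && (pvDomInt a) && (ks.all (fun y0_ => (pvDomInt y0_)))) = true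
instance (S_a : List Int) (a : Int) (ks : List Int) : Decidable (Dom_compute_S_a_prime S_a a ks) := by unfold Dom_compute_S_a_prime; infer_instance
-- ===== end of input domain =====

-- B processes only the first k with the full transform+filter and prunes the surviving
-- set by preimage-membership for every later k instead of rebuilding a transformed set
-- per k (objective: alternative decomposition). A returns None on empty ks and raises
-- ValueError when 4*a = 0 or some k is not invertible mod 4*a: those inputs are outside Pre_.


-- ===== PORT A =====
-- pow(k, -1, m): exact for m ≠ 0 and gcd(k, m) = 1 (guaranteed by Pre_); Python raises
-- ValueError elsewhere. Python's result is the unique inverse of k reduced by `% m`,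
-- which is Int.fmod of any representative of the inverse class; Int.gcdA provides one.
def pvInvMod (k m : Int) : Int := Int.fmod (Int.gcdA k m) m

-- the inner loop of A (and, identically, the first-k loop of B):
--   transformed = set(); for s in S_a: val = ((s+k-1)*k_inv) % m; if val % 4 == 3: transformed.add(val)
def pvTransformed (S_a : List Int) (k kinv m : Int) : PySem.Set Int :=
  S_a.foldl (fun t s =>
    let val := PySem.Int.mod ((s + k - 1) * kinv) m
    if PySem.Int.mod val 4 = 3 then PySem.Set.add t val else t) PySem.Set.empty

def compute_S_a_prime (S_a : List Int) (a : Int) (ks : List Int) : List Int :=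
  let m := 4 * a
  match ks.foldl (fun (result : Option (PySem.Set Int)) k =>
      let k_inv := pvInvMod k m
      let transformed := pvTransformed S_a k k_inv m
      match result with
      | none => some transformed
      | some r => some (PySem.Set.inter r transformed)) none with
  | none => []      -- Python returns None here (ks = []); excluded by Pre_
  | some r => r

-- ===== PORT B =====
def compute_S_a_prime_alt (S_a : List Int) (a : Int) (ks : List Int) : List Int :=
  match ks with
  | [] => []        -- Python returns None here; excluded by Pre_
  | k0 :: rest =>
    let m := 4 * a
    let S_mod : PySem.Set Int := PySem.Set.ofList (S_a.map (fun s => PySem.Int.mod s m))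
    let k0_inv := pvInvMod k0 m
    let result := pvTransformed S_a k0 k0_inv m
    -- B's per-k gcd guard only RAISES ValueError (gcd(k,m) ≠ 1, outside Pre_), so it has
    -- no value to port; on inputs where B returns, the loop body is exactly this filter
    rest.foldl (fun r k =>
      r.filter (fun val => PySem.Set.contains S_mod (PySem.Int.mod (val * k - k + 1) m))) result

-- ===== PRECONDITION & SPEC =====
-- Pre_ excludes exactly where A raises or returns None: ks = [] (A returns None, not a list),
-- and 4*a = 0 or a non-invertible k (pow(k, -1, 4*a) raises ValueError).
def Pre_compute_S_a_prime (S_a : List Int) (a : Int) (ks : List Int) : Prop :=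
  ks ≠ [] ∧ a ≠ 0 ∧ ∀ k ∈ ks, Int.gcd k (4 * a) = 1
instance (S_a : List Int) (a : Int) (ks : List Int) : Decidable (Pre_compute_S_a_prime S_a a ks) := by unfold Pre_compute_S_a_prime; infer_instance

def pvWitness_compute_S_a_prime : List Int × Int × List Int := ([3, 7, 10], 1, [3, 5])

def Spec_compute_S_a_prime (S_a : List Int) (a : Int) (ks : List Int) (out : List Int) : Prop := out = compute_S_a_prime_alt S_a a ks
instance (S_a : List Int) (a : Int) (ks : List Int) (out : List Int) : Decidable (Spec_compute_S_a_prime S_a a ks out) := by unfold Spec_compute_S_a_prime; infer_instance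

-- ===== CLAIM (what is proved, stated in full; the proofs are below) =====
def Claim_equal_compute_S_a_prime : Prop := ∀ (S_a : List Int) (a : Int) (ks : List Int), Dom_compute_S_a_prime S_a a ks → Pre_compute_S_a_prime S_a a ks → Spec_compute_S_a_prime S_a a ks (compute_S_a_prime S_a a ks)

-- ===== LEMMAS AND PROOFS =====

theorem pv_fmod_congr {x y m : Int} (h : m ∣ x - y) : Int.fmod x m = Int.fmod y m := by
  obtain ⟨t, ht⟩ := h
  have hx : x = y + m * t := by linarith
  rw [hx, Int.add_mul_fmod_self_left]

theorem pv_inv_spec {k m : Int} (hg : Int.gcd k m = 1) : m ∣ k * pvInvMod k m - 1 := by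
  have hab : (1 : Int) = k * Int.gcdA k m + m * Int.gcdB k m := by
    have := Int.gcd_eq_gcd_ab k m
    rw [hg] at this; exact_mod_cast this
  have h1 : m ∣ Int.fmod (Int.gcdA k m) m - Int.gcdA k m := Int.dvd_fmod_sub_self
  have : k * pvInvMod k m - 1
      = k * (Int.fmod (Int.gcdA k m) m - Int.gcdA k m) + m * (-Int.gcdB k m) := by
    unfold pvInvMod; rw [hab]; ring
  rw [this]
  exact dvd_add (Dvd.dvd.mul_left h1 k) (Dvd.dvd.mul_right dvd_rfl _)

theorem pv_mem_transformed (S_a : List Int) (k kinv m val : Int) :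
    val ∈ pvTransformed S_a k kinv m ↔
      ∃ s ∈ S_a, PySem.Int.mod ((s + k - 1) * kinv) m = val ∧ PySem.Int.mod val 4 = 3 := by
  unfold pvTransformed
  suffices h : ∀ (t : PySem.Set Int), val ∈ S_a.foldl (fun t s =>
      let v := PySem.Int.mod ((s + k - 1) * kinv) m
      if PySem.Int.mod v 4 = 3 then PySem.Set.add t v else t) t ↔
      val ∈ t ∨ ∃ s ∈ S_a, PySem.Int.mod ((s + k - 1) * kinv) m = val ∧ PySem.Int.mod val 4 = 3 by
    rw [h PySem.Set.empty]
    simp [PySem.Set.empty]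
  induction S_a with
  | nil => simp
  | cons s rest ih =>
    intro t
    simp only [List.foldl_cons, ih]
    by_cases h4 : PySem.Int.mod (PySem.Int.mod ((s + k - 1) * kinv) m) 4 = 3
    · simp only [h4, if_pos, PySem.Set.mem_add]
      constructor
      · rintro (⟨hv | hv⟩ | ⟨s', hs', hv, h3⟩)
        · exact Or.inl hv
        · exact Or.inr ⟨s, List.mem_cons_self .., hv.symm, by rw [hv]; exact h4⟩
        · exact Or.inr ⟨s', List.mem_cons_of_mem _ hs', hv, h3⟩
      · rintro (hv | ⟨s', hs', hv, h3⟩)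
        · exact Or.inl (Or.inl hv)
        · rcases List.mem_cons.mp hs' with rfl | hs'
          · exact Or.inl (Or.inr hv.symm)
          · exact Or.inr ⟨s', hs', hv, h3⟩
    · simp only [h4, if_neg, not_false_iff]
      constructor
      · rintro (hv | ⟨s', hs', hv, h3⟩)
        · exact Or.inl hv
        · exact Or.inr ⟨s', List.mem_cons_of_mem _ hs', hv, h3⟩
      · rintro (hv | ⟨s', hs', hv, h3⟩)
        · exact Or.inl hv
        · rcases List.mem_cons.mp hs' with rfl | hs'
          · exact absurd (hv ▸ h3) h4
          · exact Or.inr ⟨s', hs', hv, h3⟩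

theorem pv_transformed_inv {S_a : List Int} {k kinv m val : Int}
    (h : val ∈ pvTransformed S_a k kinv m) :
    Int.fmod val m = val ∧ Int.fmod val 4 = 3 := by
  rcases (pv_mem_transformed S_a k kinv m val).mp h with ⟨s, _, hv, h3⟩
  refine ⟨?_, h3⟩
  rw [← hv]
  exact Int.fmod_fmod _ _

-- the key pointwise fact: for a reduced val ≡ 3 (mod 4), membership in the transformed
-- set of k equals membership of its preimage (val*k - k + 1) % m in S_a reduced mod m
theorem pv_key {S_a : List Int} {k kinv m val : Int}
    (hinv : m ∣ k * kinv - 1) (hred : Int.fmod val m = val) (h3 : Int.fmod val 4 = 3) :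
    val ∈ pvTransformed S_a k kinv m ↔
      Int.fmod (val * k - k + 1) m ∈ S_a.map (fun s => Int.fmod s m) := by
  rw [pv_mem_transformed]
  constructor
  · rintro ⟨s, hs, hv, -⟩
    have h1 : m ∣ val - (s + k - 1) * kinv := by
      rw [← hv]; exact Int.dvd_fmod_sub_self
    have h2 : m ∣ (val * k - k + 1) - s := by
      have : (val * k - k + 1) - s
          = (val - (s + k - 1) * kinv) * k + (k * kinv - 1) * (s + k - 1) := by ring
      rw [this]
      exact dvd_add (Dvd.dvd.mul_right h1 k) (Dvd.dvd.mul_right hinv _)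
    exact List.mem_map.mpr ⟨s, hs, (pv_fmod_congr h2).symm⟩
  · intro hmem
    rcases List.mem_map.mp hmem with ⟨s, hs, hseq⟩
    refine ⟨s, hs, ?_, h3⟩
    have hds : m ∣ s - (val * k - k + 1) := by
      have h1 : m ∣ Int.fmod s m - s := Int.dvd_fmod_sub_self
      have h2 : m ∣ Int.fmod (val * k - k + 1) m - (val * k - k + 1) := Int.dvd_fmod_sub_self
      have : s - (val * k - k + 1)
          = (Int.fmod (val * k - k + 1) m - (val * k - k + 1)) - (Int.fmod s m - s) := by
        rw [hseq]; ring
      rw [this]; exact dvd_sub h2 h1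
    have h2 : m ∣ (s + k - 1) * kinv - val := by
      have : (s + k - 1) * kinv - val
          = (s - (val * k - k + 1)) * kinv + val * (k * kinv - 1) := by ring
      rw [this]
      exact dvd_add (Dvd.dvd.mul_right hds kinv) (Dvd.dvd.mul_left hinv val)
    calc PySem.Int.mod ((s + k - 1) * kinv) m
        = Int.fmod val m := pv_fmod_congr h2
      _ = val := hred

-- the pruning loop of B computes exactly the intersection loop of A, given the invariant
theorem pv_loop_eq (S_a : List Int) (m : Int) (rest : List Int)
    (hks : ∀ k ∈ rest, Int.gcd k m = 1) (r : PySem.Set Int)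
    (hr : ∀ v ∈ r, Int.fmod v m = v ∧ Int.fmod v 4 = 3) :
    rest.foldl (fun (result : Option (PySem.Set Int)) k =>
        let k_inv := pvInvMod k m
        let transformed := pvTransformed S_a k k_inv m
        match result with
        | none => some transformed
        | some r => some (PySem.Set.inter r transformed)) (some r)
    = some (rest.foldl (fun r k =>
        r.filter (fun val => PySem.Set.contains
          (PySem.Set.ofList (S_a.map (fun s => PySem.Int.mod s m)))
          (PySem.Int.mod (val * k - k + 1) m))) r) := by
  induction rest generalizing r with
  | nil => rfl
  | cons k rest ih =>
    simp only [List.foldl_cons]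
    have hstep : PySem.Set.inter r (pvTransformed S_a k (pvInvMod k m) m)
        = r.filter (fun val => PySem.Set.contains
            (PySem.Set.ofList (S_a.map (fun s => PySem.Int.mod s m)))
            (PySem.Int.mod (val * k - k + 1) m)) := by
      unfold PySem.Set.inter
      apply List.filter_congr
      intro v hv
      rcases hr v hv with ⟨hred, h3⟩
      have hkey := pv_key (S_a := S_a) (pv_inv_spec (hks k (List.mem_cons_self ..))) hred h3
      rw [Bool.eq_iff_iff, PySem.Set.contains_iff, PySem.Set.contains_iff, PySem.Set.mem_ofList]
      exact hkey
    rw [hstep]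
    exact ih (fun k' hk' => hks k' (List.mem_cons_of_mem _ hk'))
      _ (fun v hv => hr v (List.mem_of_mem_filter hv))

-- ===== VERDICT (by name: the statement is the Claim_ definition above) =====
theorem compute_S_a_prime_spec : Claim_equal_compute_S_a_prime := by
  intro S_a a ks _ hpre
  rcases hpre with ⟨hne, _, hks⟩
  unfold Spec_compute_S_a_prime compute_S_a_prime compute_S_a_prime_alt
  match ks, hne with
  | k0 :: rest, _ =>
    simp only [List.foldl_cons]
    rw [pv_loop_eq S_a (4 * a) rest
      (fun k hk => hks k (List.mem_cons_of_mem _ hk))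
      (pvTransformed S_a k0 (pvInvMod k0 (4 * a)) (4 * a))
      (fun v hv => pv_transformed_inv hv)]
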